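-- pv_equiv track=rewrite | github.com/logarithm27/Discrete_System_Simulator | utility.py | set_of_possible_events_of_all_states
-- ===== SOURCE A (Python) =====
-- def set_of_possible_events_of_all_states(states, transitions):
--     # gamma is a dictionary : keys are states, and values are possible events that can go in or out that corresponding state
--     gamma = {}
--     for state in states:
--         # each state has a list of events
--         gamma[state] = []
--     for transition in transitions:
--         # adding events that can go from the state
--         gamma[transition['source']].append(transition['event'])
--         # adding events that can left or goes into the state
--         # gamma[transition['destination']].append(transition['event'])
--     for state in gamma:
--         # removing duplicate events added in the list, so we can have a list of unique events that can be triggered from the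
--         # corresponded state
--         gamma[state] = sorted(list(dict.fromkeys(gamma[state])))  # remove duplicates
--     return gamma
-- ===== SOURCE B (Python) =====
-- def set_of_possible_events_of_all_states(states, transitions):
--     gamma = {}
--     for state in states:
--         gamma[state] = []
--     # one global sort by event: for each state equal events become adjacent and
--     # arrive in order, so a last-element check both deduplicates and leaves the
--     # per-state lists sorted -- no per-state sort or dedup pass is needed
--     for transition in sorted(transitions, key=lambda t: t['event']):
--         event = transition['event']
--         bucket = gamma[transition['source']]
--         if not bucket or bucket[-1] != event:
--             bucket.append(event)
--     return gamma
-- ===== Notes on version B (the rewrite author's own statement) =====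
-- stated objective: alternative
-- what changed: Instead of collecting all events per state and then sorting+deduplicating each state's list, B sorts the transitions once globally by event and makes a single pass appending an event only when it differs from the bucket's last element, so each bucket is built already sorted and duplicate-free.
import Mathlib
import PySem

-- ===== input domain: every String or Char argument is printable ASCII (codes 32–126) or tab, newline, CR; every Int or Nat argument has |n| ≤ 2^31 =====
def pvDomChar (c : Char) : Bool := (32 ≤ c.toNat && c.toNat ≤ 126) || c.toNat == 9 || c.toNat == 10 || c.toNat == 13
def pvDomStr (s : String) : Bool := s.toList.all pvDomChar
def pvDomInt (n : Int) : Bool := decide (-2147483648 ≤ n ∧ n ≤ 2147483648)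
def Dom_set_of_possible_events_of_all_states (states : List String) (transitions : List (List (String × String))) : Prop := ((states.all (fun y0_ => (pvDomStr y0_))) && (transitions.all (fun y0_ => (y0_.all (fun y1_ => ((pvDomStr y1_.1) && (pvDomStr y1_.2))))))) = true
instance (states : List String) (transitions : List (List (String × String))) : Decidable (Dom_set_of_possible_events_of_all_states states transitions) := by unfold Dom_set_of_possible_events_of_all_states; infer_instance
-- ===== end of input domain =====

-- B replaces A's per-state sort+dedup pass by one global sort of the transitions by event
-- followed by a single appending pass that skips an event equal to the bucket's last element
-- (objective: alternative decomposition, same asymptotic cost).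

-- ===== PORT A =====
-- transition['source'] / transition['event']; Pre_ guarantees the key is present (KeyError excluded)
def pvTGet (t : List (String × String)) (k : String) : String :=
  (PySem.Dict.mk t).getD k ""

def set_of_possible_events_of_all_states (states : List String) (transitions : List (List (String × String))) : List (String × List String) :=
  -- gamma = {}; for state in states: gamma[state] = []
  let gamma : PySem.Dict String (List String) := states.foldl (fun g state => g.insert state []) PySem.Dict.empty
  -- for transition in transitions: gamma[transition['source']].append(transition['event'])
  -- (Dict.modify is d[k] = f(d.get(k, dflt)); Pre_ excludes the KeyError of a missing source)
  let gamma := transitions.foldl (fun g t => g.modify (pvTGet t "source") [] (fun l => l ++ [pvTGet t "event"])) gamma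
  -- for state in gamma: gamma[state] = sorted(list(dict.fromkeys(gamma[state])))
  let gamma := gamma.keys.foldl (fun g state => g.insert state (PySem.List.sorted (PySem.List.dedup (g.getD state [])) (fun x => x) false)) gamma
  gamma.items

-- ===== PORT B =====
def set_of_possible_events_of_all_states_alt (states : List String) (transitions : List (List (String × String))) : List (String × List String) :=
  -- gamma = {}; for state in states: gamma[state] = []
  let gamma : PySem.Dict String (List String) := states.foldl (fun g state => g.insert state []) PySem.Dict.empty
  -- for transition in sorted(transitions, key=lambda t: t['event']): …
  let gamma := (PySem.List.sorted transitions (fun t => pvTGet t "event") false).foldl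
      (fun g t =>
        let event := pvTGet t "event"
        let bucket := g.getD (pvTGet t "source") []
        -- if not bucket or bucket[-1] != event: bucket.append(event)
        if bucket.getLast? ≠ some event then g.insert (pvTGet t "source") (bucket ++ [event]) else g)
      gamma
  gamma.items

-- ===== PRECONDITION & SPEC =====
-- Pre_ excludes exactly the inputs where A raises KeyError: a transition without a
-- 'source' or 'event' key, or whose source is not one of the states.
def Pre_set_of_possible_events_of_all_states (states : List String) (transitions : List (List (String × String))) : Prop :=
  ∀ t ∈ transitions, (∃ s ∈ states, (PySem.Dict.mk t).get? "source" = some s) ∧ ((PySem.Dict.mk t).get? "event").isSome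
instance (states : List String) (transitions : List (List (String × String))) : Decidable (Pre_set_of_possible_events_of_all_states states transitions) := by unfold Pre_set_of_possible_events_of_all_states; infer_instance

def pvWitness_set_of_possible_events_of_all_states : List String × (List (List (String × String))) :=
  (["a", "b"], [[("source", "a"), ("event", "y")], [("source", "a"), ("event", "x")], [("source", "b"), ("event", "x")], [("source", "a"), ("event", "x")]])

def Spec_set_of_possible_events_of_all_states (states : List String) (transitions : List (List (String × String))) (out : List (String × List String)) : Prop := out = set_of_possible_events_of_all_states_alt states transitions
instance (states : List String) (transitions : List (List (String × String))) (out : List (String × List String)) : Decidable (Spec_set_of_possible_events_of_all_states states transitions out) := by unfold Spec_set_of_possible_events_of_all_states; infer_instance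

-- ===== CLAIM (what is proved, stated in full; the proofs are below) =====
def Claim_equal_set_of_possible_events_of_all_states : Prop := ∀ (states : List String) (transitions : List (List (String × String))), Dom_set_of_possible_events_of_all_states states transitions → Pre_set_of_possible_events_of_all_states states transitions → Spec_set_of_possible_events_of_all_states states transitions (set_of_possible_events_of_all_states states transitions)

-- ===== LEMMAS AND PROOFS =====

-- the initial dict {state: [] for state in states}, shared shape of both ports' first loop
def pvInit (states : List String) : PySem.Dict String (List String) :=
  states.foldl (fun g state => g.insert state []) PySem.Dict.empty

lemma pvInit_getD_aux (states : List String) (d : PySem.Dict String (List String)) (s : String)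
    (h : d.getD s [] = []) :
    (states.foldl (fun g state => g.insert state []) d).getD s [] = [] := by
  induction states generalizing d with
  | nil => exact h
  | cons a t ih =>
    simp only [List.foldl_cons]
    exact ih _ (by rw [PySem.Dict.getD_insert]; split <;> simp [h])

lemma pvInit_getD (states : List String) (s : String) : (pvInit states).getD s [] = [] :=
  pvInit_getD_aux states _ s (by simp [PySem.Dict.getD_empty])

lemma pvInit_keys (states : List String) : (pvInit states).keys = PySem.Set.ofList states := by
  unfold pvInit
  rw [PySem.Dict.keys_foldl_insert]
  simp [PySem.Dict.keys_empty, PySem.Set.update, PySem.Set.ofList]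

lemma set_update_self (s : List String) (l : List String) (h : ∀ x ∈ l, x ∈ s) :
    PySem.Set.update s l = s := by
  induction l generalizing s with
  | nil => rfl
  | cons a t ih =>
    have : PySem.Set.add s a = s := by
      simp [PySem.Set.add, PySem.Set.contains, h a (by simp)]
    simp only [PySem.Set.update, List.foldl_cons] at *
    rw [this, ih s (fun x hx => h x (by simp [hx]))]

-- B's conditional-append loop, projected at one key
lemma loopB_getD (l : List (String × String)) (d : PySem.Dict String (List String)) (s : String) :
    (l.foldl (fun g p => if (g.getD p.1 []).getLast? ≠ some p.2 then g.insert p.1 (g.getD p.1 [] ++ [p.2]) else g) d).getD s []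
      = ((l.filter (fun p => p.1 == s)).map (·.2)).foldl (fun a e => if a.getLast? ≠ some e then a ++ [e] else a) (d.getD s []) := by
  induction l generalizing d with
  | nil => rfl
  | cons p t ih =>
    simp only [List.foldl_cons, List.filter_cons]
    by_cases hps : p.1 = s
    · simp only [hps, beq_self_eq_true, if_pos, List.map_cons, List.foldl_cons]
      split_ifs with hc
      · rw [ih, PySem.Dict.getD_insert]
        simp
      · rw [ih]
    · have hbe : (p.1 == s) = false := by simp [hps]
      simp only [hbe, Bool.false_eq_true, if_neg, not_false_iff]
      split_ifs with hc
      · rw [ih, PySem.Dict.getD_insert, if_neg (fun h => hps h.symm)]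
      · rw [ih]

-- B's loop does not create keys beyond those the sources name
lemma loopB_keys (l : List (String × String)) (d : PySem.Dict String (List String)) :
    (l.foldl (fun g p => if (g.getD p.1 []).getLast? ≠ some p.2 then g.insert p.1 (g.getD p.1 []  ++ [p.2]) else g) d).keys
      = PySem.Set.update d.keys (l.map (·.1)) := by
  induction l generalizing d with
  | nil => rfl
  | cons p t ih =>
    simp only [List.foldl_cons, List.map_cons, PySem.Set.update, List.foldl_cons]
    rw [← PySem.Set.update]
    split_ifs with hc
    · rw [ih]
      congr 1
      by_cases hk : d.contains p.1
      · rw [PySem.Dict.keys_insert_of_contains _ _ hk]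
        simp [PySem.Set.add, PySem.Set.contains, (PySem.Dict.contains_iff_mem_keys _ _).mp hk]
      · rw [PySem.Dict.keys_insert_of_not_contains _ _ (by simpa using hk)]
        simp only [PySem.Set.add, PySem.Set.contains]
        rw [if_neg (by
          simp only [List.contains_iff_exists_mem_beq]
          rintro ⟨a, ha, hab⟩
          exact hk ((PySem.Dict.contains_iff_mem_keys _ _).mpr ((eq_of_beq hab) ▸ ha)))]
    · rw [ih]
      congr 1
      simp only [ne_eq, not_not] at hc
      have hk : d.contains p.1 := by
        by_contra hnc
        rw [PySem.Dict.getD_of_not_contains _ _ (by simpa using hnc)] at hc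
        simp at hc
      simp [PySem.Set.add, PySem.Set.contains, (PySem.Dict.contains_iff_mem_keys _ _).mp hk]

-- A's rewrite loop over the keys: keys not in the list are untouched …
lemma loopA3_getD_untouched (ks : List String) (d : PySem.Dict String (List String)) (s : String)
    (hs : s ∉ ks) :
    (ks.foldl (fun g k => g.insert k (PySem.List.sorted (PySem.List.dedup (g.getD k [])) (fun x => x) false)) d).getD s []
      = d.getD s [] := by
  induction ks generalizing d with
  | nil => rfl
  | cons k t ih =>
    simp only [List.foldl_cons]
    rw [ih _ (fun h => hs (by simp [h])), PySem.Dict.getD_insert, if_neg (fun h => hs (by simp [h]))]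

-- … and each (nodup) key ends up with the sorted dedup of its old value
lemma loopA3_getD (ks : List String) (d : PySem.Dict String (List String)) (s : String)
    (hnd : ks.Nodup) (hs : s ∈ ks) :
    (ks.foldl (fun g k => g.insert k (PySem.List.sorted (PySem.List.dedup (g.getD k [])) (fun x => x) false)) d).getD s []
      = PySem.List.sorted (PySem.List.dedup (d.getD s [])) (fun x => x) false := by
  induction ks generalizing d with
  | nil => simp at hs
  | cons k t ih =>
    simp only [List.foldl_cons]
    rcases List.mem_cons.mp hs with h | h
    · subst h
      rw [loopA3_getD_untouched _ _ _ (List.Nodup.notMem hnd), PySem.Dict.getD_insert, if_pos rfl]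
    · rw [ih _ (hnd.of_cons) h, PySem.Dict.getD_insert,
        if_neg (fun (he : s = k) => (List.Nodup.notMem hnd) (he ▸ h))]

lemma le_getLast_of_pairwise_le (l : List String) (a : String) (m : String)
    (hp : l.Pairwise (· ≤ ·)) (ha : a ∈ l) (hm : l.getLast? = some m) : a ≤ m := by
  induction l with
  | nil => simp at ha
  | cons x t ih =>
    rcases List.mem_cons.mp ha with h | h
    · subst h
      cases t with
      | nil => simp at hm; exact le_of_eq hm
      | cons y u =>
        have hmm : m ∈ y :: u := List.mem_of_getLast? (by rwa [List.getLast?_cons_cons] at hm)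
        exact (List.pairwise_cons.mp hp).1 m hmm
    · cases t with
      | nil => simp at h
      | cons y u =>
        exact ih (List.pairwise_cons.mp hp).2 h (by rwa [List.getLast?_cons_cons] at hm)

-- the core fact: folding conditional-append over a ≤-sorted list yields a <-sorted list
-- with the same members
lemma dd_spec (l acc : List String) (hacc : acc.Pairwise (· < ·)) (hl : l.Pairwise (· ≤ ·))
    (hle : ∀ a ∈ acc, ∀ y ∈ l, a ≤ y) :
    (l.foldl (fun a e => if a.getLast? ≠ some e then a ++ [e] else a) acc).Pairwise (· < ·)
      ∧ ∀ x, x ∈ l.foldl (fun a e => if a.getLast? ≠ some e then a ++ [e] else a) acc ↔ x ∈ acc ∨ x ∈ l := by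
  induction l generalizing acc with
  | nil => exact ⟨hacc, fun x => by simp⟩
  | cons e t ih =>
    simp only [List.foldl_cons]
    have hlt := (List.pairwise_cons.mp hl).2
    split_ifs with hc
    · have hmemlt : ∀ a ∈ acc, a < e := by
        intro a ha
        rcases lt_or_eq_of_le (hle a ha e (by simp)) with h | h
        · exact h
        · exfalso
          subst h
          obtain ⟨m, hm⟩ := Option.isSome_iff_exists.mp (List.getLast?_isSome.mpr (List.ne_nil_of_mem ha))
          have h1 : a ≤ m := le_getLast_of_pairwise_le acc a m (hacc.imp le_of_lt) ha hm
          have h2 : m ≤ a := hle m (List.mem_of_getLast? hm) a (by simp)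
          exact hc (by rw [hm, le_antisymm h2 h1])
      have hacc' : (acc ++ [e]).Pairwise (· < ·) := by
        rw [List.pairwise_append]
        exact ⟨hacc, by simp, by simpa using hmemlt⟩
      have hle' : ∀ a ∈ acc ++ [e], ∀ y ∈ t, a ≤ y := by
        intro a ha y hy
        rcases List.mem_append.mp ha with h | h
        · exact hle a h y (by simp [hy])
        · simp at h; subst h; exact (List.pairwise_cons.mp hl).1 y hy
      obtain ⟨h1, h2⟩ := ih (acc ++ [e]) hacc' hlt hle'
      refine ⟨h1, fun x => ?_⟩
      rw [h2 x]
      simp only [List.mem_append, List.mem_cons]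
      tauto
    · simp only [ne_eq, not_not] at hc
      have he : e ∈ acc := List.mem_of_getLast? hc
      obtain ⟨h1, h2⟩ := ih acc hacc hlt (fun a ha y hy => hle a ha y (by simp [hy]))
      refine ⟨h1, fun x => ?_⟩
      rw [h2 x]
      constructor
      · tauto
      · rintro (h | h)
        · exact Or.inl h
        · rcases List.mem_cons.mp h with h | h
          · exact Or.inl (h ▸ he)
          · exact Or.inr h

-- the mathematical heart: sorted(dedup(evsA)) equals the conditional-append fold over any
-- ≤-sorted permutation evsB of evsA
lemma sorted_dedup_eq_ddfold (evsA evsB : List String)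
    (hperm : evsB.Perm evsA) (hsorted : evsB.Pairwise (· ≤ ·)) :
    PySem.List.sorted (PySem.List.dedup evsA) (fun x => x) false
      = evsB.foldl (fun a e => if a.getLast? ≠ some e then a ++ [e] else a) [] := by
  obtain ⟨h1, h2⟩ := dd_spec evsB [] List.Pairwise.nil hsorted (by simp)
  refine PySem.List.sorted_eq_of_perm_of_pairwise_lt _ _ _ ?_ h1
  refine (List.perm_ext_iff_of_nodup (h1.imp ne_of_lt) (PySem.List.nodup_dedup _)).mpr ?_
  intro x
  rw [h2 x, PySem.List.mem_dedup, ← hperm.mem_iff]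
  simp

-- ===== VERDICT (by name: the statement is the Claim_ definition above) =====
theorem set_of_possible_events_of_all_states_spec : Claim_equal_set_of_possible_events_of_all_states := by
  intro states transitions _hdom hpre
  unfold Spec_set_of_possible_events_of_all_states
  unfold set_of_possible_events_of_all_states set_of_possible_events_of_all_states_alt
  simp only []
  -- name the shared pieces
  set pf : List (String × String) → String × String := fun t => (pvTGet t "source", pvTGet t "event") with hpf
  have hsrc : ∀ t ∈ transitions, pvTGet t "source" ∈ states := by
    intro t ht
    obtain ⟨⟨s, hs, hget⟩, _⟩ := hpre t ht
    unfold pvTGet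
    rw [PySem.Dict.getD_of_get?_eq_some _ _ hget]
    exact hs
  -- A's appending loop and B's loop, in pair form
  have hA2 : transitions.foldl (fun g t => g.modify (pvTGet t "source") [] (fun l => l ++ [pvTGet t "event"])) (pvInit states)
      = (transitions.map pf).foldl (fun g p => g.modify p.1 [] (fun v => v ++ [p.2])) (pvInit states) := by
    rw [List.foldl_map]
  have hB2 : (PySem.List.sorted transitions (fun t => pvTGet t "event") false).foldl
        (fun g t =>
          let event := pvTGet t "event"
          let bucket := g.getD (pvTGet t "source") []
          if bucket.getLast? ≠ some event then g.insert (pvTGet t "source") (bucket ++ [event]) else g)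
        (pvInit states)
      = ((PySem.List.sorted transitions (fun t => pvTGet t "event") false).map pf).foldl
          (fun g p => if (g.getD p.1 []).getLast? ≠ some p.2 then g.insert p.1 (g.getD p.1 [] ++ [p.2]) else g)
          (pvInit states) := by
    rw [List.foldl_map]
  rw [show (states.foldl (fun g state => g.insert state []) PySem.Dict.empty) = pvInit states from rfl,
      hA2, hB2]
  set dA2 := (transitions.map pf).foldl (fun g p => g.modify p.1 [] (fun v => v ++ [p.2])) (pvInit states) with hdA2
  set dB2 := ((PySem.List.sorted transitions (fun t => pvTGet t "event") false).map pf).foldl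
      (fun g p => if (g.getD p.1 []).getLast? ≠ some p.2 then g.insert p.1 (g.getD p.1 [] ++ [p.2]) else g)
      (pvInit states) with hdB2
  -- keys of the intermediate dicts
  have hkA2 : dA2.keys = PySem.Set.ofList states := by
    have h := PySem.Dict.keys_foldl_modify_key (ν := List String) (transitions.map pf)
      (fun p => p.1) [] (fun _ p v => v ++ [p.2]) (pvInit states)
    rw [pvInit_keys] at h
    refine h.trans (set_update_self _ _ ?_)
    intro x hx
    simp only [List.map_map, List.mem_map] at hx
    obtain ⟨t, ht, hxt⟩ := hx
    rw [PySem.Set.mem_ofList]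
    exact hxt ▸ hsrc t ht
  have hkB2 : dB2.keys = PySem.Set.ofList states := by
    rw [hdB2, loopB_keys, pvInit_keys]
    refine set_update_self _ _ ?_
    intro x hx
    simp only [List.map_map, List.mem_map] at hx
    obtain ⟨t, ht, hxt⟩ := hx
    rw [PySem.Set.mem_ofList]
    exact hxt ▸ hsrc t ((PySem.List.sorted_perm transitions _ false).mem_iff.mp ht)
  have hndA2 : dA2.keys.Nodup := hkA2 ▸ PySem.Set.nodup_ofList states
  have hndB2 : dB2.keys.Nodup := hkB2 ▸ PySem.Set.nodup_ofList states
  -- A's third loop: keys unchanged, so both final dicts have key list ofList states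
  set dA3 := dA2.keys.foldl (fun g k => g.insert k (PySem.List.sorted (PySem.List.dedup (g.getD k [])) (fun x => x) false)) dA2 with hdA3
  have hkA3 : dA3.keys = PySem.Set.ofList states := by
    have h := PySem.Dict.keys_foldl_insert (ν := List String) dA2.keys
      (fun g k => PySem.List.sorted (PySem.List.dedup (g.getD k [])) (fun x => x) false) dA2
    exact h.trans ((set_update_self _ _ (fun x hx => hx)).trans hkA2)
  have hndA3 : dA3.keys.Nodup := hkA3 ▸ PySem.Set.nodup_ofList states
  -- items via the key list and per-key values
  rw [PySem.Dict.items_eq_map_keys dA3 hndA3 [], PySem.Dict.items_eq_map_keys dB2 hndB2 [],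
    hkA3, hkB2]
  refine List.map_congr_left ?_
  intro s hsmem
  -- per-key values
  have hvA2 : dA2.getD s [] = ((transitions.map pf).filter (fun p => p.1 == s)).map (·.2) := by
    rw [hdA2, PySem.Dict.getD_foldl_modify_append, pvInit_getD]
    rfl
  have hvA3 : dA3.getD s []
      = PySem.List.sorted (PySem.List.dedup (((transitions.map pf).filter (fun p => p.1 == s)).map (·.2))) (fun x => x) false := by
    rw [hdA3, loopA3_getD _ _ _ hndA2 (by rw [hkA2]; exact hsmem), hvA2]
  have hvB2 : dB2.getD s []
      = ((((PySem.List.sorted transitions (fun t => pvTGet t "event") false).map pf).filter (fun p => p.1 == s)).map (·.2)).foldl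
          (fun a e => if a.getLast? ≠ some e then a ++ [e] else a) [] := by
    rw [hdB2, loopB_getD, pvInit_getD]
  rw [hvA3, hvB2]
  congr 1
  -- the two event lists: a permutation, with B's ≤-sorted
  apply sorted_dedup_eq_ddfold
  · exact ((((PySem.List.sorted_perm transitions (fun t => pvTGet t "event") false)).map pf).filter _).map _
  · refine List.pairwise_map.mpr (List.Pairwise.filter _ (List.pairwise_map.mpr ?_))
    exact PySem.List.sorted_pairwise transitions (fun t => pvTGet t "event")
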